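-- pv_equiv track=rewrite | github.com/richiechz-dev/FinKaan-Backend-main | finkaan_backend/services/analysis_service.py | _repair_json_strings
-- ===== SOURCE A (Python) =====
-- def _repair_json_strings(text: str) -> str:
--     """
--     Intenta reparar JSON con comillas dobles no escapadas dentro de valores string.
--     Reemplaza comillas dobles internas por comillas simples.
--     """
--     # Estrategia: parsear carácter a carácter y escapar comillas dentro de strings
--     result = []
--     in_string = False
--     escape_next = False
--     i = 0
--
--     while i < len(text):
--         ch = text[i]
--
--         if escape_next:
--             result.append(ch)
--             escape_next = False
--             i += 1
--             continue
--
--         if ch == "\\":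
--             escape_next = True
--             result.append(ch)
--             i += 1
--             continue
--
--         if ch == '"':
--             if not in_string:
--                 in_string = True
--                 result.append(ch)
--             else:
--                 # ¿Es el cierre real? Mira el siguiente carácter no-espacio
--                 rest = text[i + 1:].lstrip()
--                 if rest and rest[0] in (",", "}", "]", ":"):
--                     in_string = False
--                     result.append(ch)
--                 else:
--                     # Comilla dentro del string — reemplazar por comilla simple
--                     result.append("'")
--         else:
--             result.append(ch)
--
--         i += 1
--
--     return "".join(result)
-- ===== SOURCE B (Python) =====
-- def _repair_json_strings(text: str) -> str:
--     # One reverse pass: nxt[i] = first non-whitespace character after position i (None if none),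
--     # then a single forward pass with O(1) lookups instead of lstrip-scanning the tail each time.
--     nxt = []
--     cur = None
--     for ch in reversed(text):
--         nxt.append(cur)
--         if not ch.isspace():
--             cur = ch
--     nxt.reverse()
--     out = []
--     in_string = False
--     escape = False
--     for ch, nx in zip(text, nxt):
--         if escape:
--             out.append(ch)
--             escape = False
--         elif ch == "\\":
--             escape = True
--             out.append(ch)
--         elif ch == '"':
--             if not in_string:
--                 in_string = True
--                 out.append(ch)
--             elif nx in (",", "}", "]", ":"):
--                 in_string = False
--                 out.append(ch)
--             else:
--                 out.append("'")
--         else: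
--             out.append(ch)
--     return "".join(out)
-- ===== Notes on version B (the rewrite author's own statement) =====
-- stated objective: faster
-- what changed: Replaced the per-quote lstrip scan of the remaining text with a next-non-whitespace lookup table built in one reverse pass, making the closing-quote test O(1).
import Mathlib
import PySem

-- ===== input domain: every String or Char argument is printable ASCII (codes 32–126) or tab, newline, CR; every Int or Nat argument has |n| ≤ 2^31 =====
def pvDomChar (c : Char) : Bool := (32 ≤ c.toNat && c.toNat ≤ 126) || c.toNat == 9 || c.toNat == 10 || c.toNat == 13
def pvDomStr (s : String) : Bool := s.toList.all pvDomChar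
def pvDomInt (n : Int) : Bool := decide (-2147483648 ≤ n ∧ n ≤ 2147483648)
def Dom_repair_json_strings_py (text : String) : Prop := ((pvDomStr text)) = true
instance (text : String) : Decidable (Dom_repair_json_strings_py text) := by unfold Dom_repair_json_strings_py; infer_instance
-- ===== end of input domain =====

-- B replaces A's lstrip-of-the-tail at every closing-quote test by a next-non-whitespace table
-- built in one reverse pass (objective: faster, O(n) instead of O(n^2) worst case).

-- ===== PORT A =====
def pvCloser (c : Char) : Bool := c = ',' || c = '}' || c = ']' || c = ':'

-- A's while loop, step for step: the i-th step sees text[i] and, at a quote inside a string,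
-- looks at text[i+1:].lstrip()
def pvALoop : List Char → Bool → Bool → List Char
  | [], _, _ => []
  | ch :: rest, inStr, esc =>
    if esc then ch :: pvALoop rest inStr false
    else if ch = '\\' then ch :: pvALoop rest inStr true
    else if ch = '"' then
      if inStr = false then ch :: pvALoop rest true esc
      else
        match PySem.Chars.lstrip rest with
        | c :: _ =>
          if pvCloser c then ch :: pvALoop rest false esc
          else '\'' :: pvALoop rest inStr esc
        | [] => '\'' :: pvALoop rest inStr esc
    else ch :: pvALoop rest inStr esc

def repair_json_strings_py (text : String) : String :=
  String.ofList (pvALoop text.toList false false)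

-- ===== PORT B =====
-- B's reverse pass: state = (nxt so far, current next-non-ws). Python appends and reverses at
-- the end; consing during the same reversed iteration yields that reversed-back list directly.
def pvBStep (st : List (Option Char) × Option Char) (ch : Char) : List (Option Char) × Option Char :=
  (st.2 :: st.1, if PySem.Chars.isspace ch then st.2 else some ch)

-- B's forward pass over zip(text, nxt)
def pvBLoop : List (Char × Option Char) → Bool → Bool → List Char
  | [], _, _ => []
  | (ch, nx) :: rest, inStr, esc =>
    if esc then ch :: pvBLoop rest inStr false
    else if ch = '\\' then ch :: pvBLoop rest inStr true
    else if ch = '"' then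
      if inStr = false then ch :: pvBLoop rest true esc
      else
        match nx with
        | some c =>
          if pvCloser c then ch :: pvBLoop rest false esc
          else '\'' :: pvBLoop rest inStr esc
        | none => '\'' :: pvBLoop rest inStr esc
    else ch :: pvBLoop rest inStr esc

def repair_json_strings_py_alt (text : String) : String :=
  let cs := text.toList
  let nxt := (cs.reverse.foldl pvBStep ([], (none : Option Char))).1
  String.ofList (pvBLoop (cs.zip nxt) false false)

-- ===== PRECONDITION & SPEC =====
def Spec_repair_json_strings_py (text : String) (out : String) : Prop := out = repair_json_strings_py_alt text
instance (text : String) (out : String) : Decidable (Spec_repair_json_strings_py text out) := by unfold Spec_repair_json_strings_py; infer_instance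

-- ===== CLAIM (what is proved, stated in full; the proofs are below) =====
def Claim_equal_repair_json_strings_py : Prop := ∀ (text : String), Dom_repair_json_strings_py text → Spec_repair_json_strings_py text (repair_json_strings_py text)

-- ===== LEMMAS AND PROOFS =====
-- proof-only recursive characterisation of B's reverse foldl (cur = running next-non-ws seed)
def pvG : List Char → Option Char → List (Option Char) × Option Char
  | [], cur => ([], cur)
  | c :: cs, cur =>
    let p := pvG cs cur
    (p.2 :: p.1, if PySem.Chars.isspace c then p.2 else some c)

theorem pvFoldl_eq_pvG (cs : List Char) :
    ∀ acc cur, cs.reverse.foldl pvBStep (acc, cur) = ((pvG cs cur).1 ++ acc, (pvG cs cur).2) := by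
  induction cs with
  | nil => intro acc cur; rfl
  | cons c cs ih =>
    intro acc cur
    simp only [List.reverse_cons, List.foldl_append, List.foldl_cons, List.foldl_nil, ih]
    simp [pvBStep, pvG]

theorem pvG_snd (cs : List Char) :
    (pvG cs none).2 = (PySem.Chars.lstrip cs).head? := by
  induction cs with
  | nil => rfl
  | cons c cs ih =>
    simp only [pvG, PySem.Chars.lstrip, List.dropWhile] at *
    by_cases h : PySem.Chars.isspace c
    · simp [h, ih]
    · simp [h]

theorem pvLoop_eq (cs : List Char) : ∀ inStr esc,
    pvBLoop (cs.zip (pvG cs none).1) inStr esc = pvALoop cs inStr esc := by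
  induction cs with
  | nil => intro _ _; rfl
  | cons c cs ih =>
    intro inStr esc
    have hz : (c :: cs).zip (pvG (c :: cs) none).1
        = (c, (pvG cs none).2) :: cs.zip (pvG cs none).1 := by
      simp [pvG]
    rw [hz]
    simp only [pvBLoop, pvALoop, pvG_snd cs, ih]
    cases (PySem.Chars.lstrip cs) <;> rfl

-- ===== VERDICT (by name: the statement is the Claim_ definition above) =====
theorem repair_json_strings_py_spec : Claim_equal_repair_json_strings_py := by
  intro text _
  show _ = _
  simp only [repair_json_strings_py, repair_json_strings_py_alt,
    pvFoldl_eq_pvG text.toList [] none, List.append_nil, pvLoop_eq]
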